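-- pv_equiv track=rewrite | github.com/MaharshiPedu/Primenumbers-Technologies-Q1 | Primenumbers_tech.py | solution
-- ===== SOURCE A (Python) =====
-- def solution(input):
--     output = [[list(input[0].keys())[0], list(input[0].values())[0]]]
--     for i in range(1, len(input)):
--         group = []
--         key = list(input[i].keys())[0]
--         value = list(input[i].values())[0]
--         flag = 0
--         for j in range(len(output)):
--             if key in output[j]:
--                 output[j].append(value)
--                 flag = 1
--                 break
--             elif value in output[j]:
--                 output[j].append(key)
--                 flag = 1
--                 break
--         if flag == 0:
--             group.append(key)
--             group.append(value)
--             output.append(group)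
--     return output
-- ===== SOURCE B (Python) =====
-- def solution(input):
--     # Single pass with an element->first-group-index dictionary instead of rescanning all groups.
--     output = []
--     idx = {}
--     for d in input:
--         key, value = next(iter(d.items()))
--         jk = idx.get(key)
--         jv = idx.get(value)
--         if jk is None and jv is None:
--             j = len(output)
--             output.append([key, value])
--             idx[key] = j
--             idx[value] = j
--         elif jv is None or (jk is not None and jk <= jv):
--             output[jk].append(value)
--             idx[value] = jk
--         else:
--             output[jv].append(key)
--             idx[key] = jv
--     return output
-- ===== Notes on version B (the rewrite author's own statement) =====
-- stated objective: alternative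
-- what changed: B replaces A's per-item rescan of every existing group by a dictionary mapping each element to the first group index containing it, and appends to the minimal matching group.
import Mathlib
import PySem

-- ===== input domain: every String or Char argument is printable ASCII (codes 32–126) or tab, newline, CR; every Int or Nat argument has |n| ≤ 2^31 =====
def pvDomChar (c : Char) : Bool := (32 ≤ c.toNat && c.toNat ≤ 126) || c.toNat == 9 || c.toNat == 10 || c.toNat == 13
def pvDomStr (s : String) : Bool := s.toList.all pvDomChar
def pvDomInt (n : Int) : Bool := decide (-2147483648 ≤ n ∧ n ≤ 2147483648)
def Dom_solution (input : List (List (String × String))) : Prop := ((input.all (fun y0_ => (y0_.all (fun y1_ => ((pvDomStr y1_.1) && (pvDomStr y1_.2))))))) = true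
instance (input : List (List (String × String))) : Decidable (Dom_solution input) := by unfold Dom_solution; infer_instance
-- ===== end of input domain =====

-- B replaces A's rescan of every existing group per item by an element→first-group-index
-- dictionary, appending to the group of minimal matching index (objective: alternative).

-- ===== PORT A =====
-- key = list(d.keys())[0]; value = list(d.values())[0]  (default "" never used under Pre_)
def solnKey (d : List (String × String)) : String :=
  PySem.List.pyGetD (PySem.Dict.ofList d).keys 0 ""
def solnVal (d : List (String × String)) : String :=
  PySem.List.pyGetD (PySem.Dict.ofList d).values 0 ""

-- A's inner loop over output: first group containing key (append value) or value (append key); none = flag 0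
def solnScan (key value : String) : List (List String) → Option (List (List String))
  | [] => none
  | g :: rest =>
    if key ∈ g then some ((g ++ [value]) :: rest)
    else if value ∈ g then some ((g ++ [key]) :: rest)
    else (solnScan key value rest).map (g :: ·)

def solnStep (output : List (List String)) (d : List (String × String)) : List (List String) :=
  match solnScan (solnKey d) (solnVal d) output with
  | some out => out
  | none => output ++ [[solnKey d, solnVal d]]

def solution (input : List (List (String × String))) : List (List String) :=
  match input with
  | [] => []   -- unreachable: Python A raises IndexError on []; excluded by Pre_
  | d0 :: rest => rest.foldl solnStep [[solnKey d0, solnVal d0]]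

-- ===== PORT B =====
-- key, value = next(iter(d.items()))  (default pair never used under Pre_)
def solnAltKV (d : List (String × String)) : String × String :=
  ((PySem.Dict.ofList d).items).headD ("", "")
-- output[j].append(x)
def appendAt : List (List String) → Nat → String → List (List String)
  | [], _, _ => []
  | g :: rest, 0, x => (g ++ [x]) :: rest
  | g :: rest, n+1, x => g :: appendAt rest n x

def solnAltStep (st : List (List String) × PySem.Dict String Nat)
    (d : List (String × String)) : List (List String) × PySem.Dict String Nat :=
  let output := st.1
  let idx := st.2
  let key := (solnAltKV d).1
  let value := (solnAltKV d).2
  match idx.get? key, idx.get? value with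
  | none, none =>
      (output ++ [[key, value]], (idx.insert key output.length).insert value output.length)
  | some jk, none => (appendAt output jk value, idx.insert value jk)
  | none, some jv => (appendAt output jv key, idx.insert key jv)
  | some jk, some jv =>
      if jk ≤ jv then (appendAt output jk value, idx.insert value jk)
      else (appendAt output jv key, idx.insert key jv)

def solution_alt (input : List (List (String × String))) : List (List String) :=
  (input.foldl solnAltStep ([], PySem.Dict.empty)).1

-- ===== PRECONDITION & SPEC =====
-- Pre_ excludes exactly the inputs where Python A raises IndexError: the empty list
-- (input[0]) and inputs containing an empty dict (list(keys)[0]).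
def Pre_solution (input : List (List (String × String))) : Prop :=
  input ≠ [] ∧ ∀ d ∈ input, d ≠ []
instance (input : List (List (String × String))) : Decidable (Pre_solution input) := by
  unfold Pre_solution; infer_instance
def pvWitness_solution : (List (List (String × String))) := [[("a", "b")]]

def Spec_solution (input : List (List (String × String))) (out : List (List String)) : Prop :=
  out = solution_alt input
instance (input : List (List (String × String))) (out : List (List String)) :
    Decidable (Spec_solution input out) := by unfold Spec_solution; infer_instance

-- ===== CLAIM (what is proved, stated in full; the proofs are below) =====
def Claim_equal_solution : Prop := ∀ (input : List (List (String × String))),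
  Dom_solution input → Pre_solution input → Spec_solution input (solution input)

-- ===== LEMMAS AND PROOFS =====

-- first index of a group containing x
def fIdx (x : String) (out : List (List String)) : Option Nat :=
  out.findIdx? (fun g => decide (x ∈ g))

-- the two ports extract the same (key, value) from a dict
theorem kv_eq (d : List (String × String)) :
    solnAltKV d = (solnKey d, solnVal d) := by
  unfold solnAltKV solnKey solnVal
  have hk : (PySem.Dict.ofList d).keys = ((PySem.Dict.ofList d).items).map Prod.fst := rfl
  have hv : (PySem.Dict.ofList d).values = ((PySem.Dict.ofList d).items).map Prod.snd := rfl
  rw [hk, hv]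
  cases (PySem.Dict.ofList d).items with
  | nil => simp [PySem.List.pyGetD_zero]
  | cons p r => simp [PySem.List.pyGetD_zero]

-- A's inner loop, characterised by the first indices of key and value
theorem scan_eq (key value : String) (out : List (List String)) :
    solnScan key value out =
      match fIdx key out, fIdx value out with
      | none, none => none
      | some jk, none => some (appendAt out jk value)
      | none, some jv => some (appendAt out jv key)
      | some jk, some jv =>
          if jk ≤ jv then some (appendAt out jk value) else some (appendAt out jv key) := by
  induction out with
  | nil => rfl
  | cons g rest ih =>
    by_cases hk : key ∈ g
    · by_cases hv : value ∈ g
      · simp [solnScan, hk, hv, fIdx, List.findIdx?_cons, appendAt]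
      · simp only [fIdx, List.findIdx?_cons, hk, hv]
        cases List.findIdx? (fun g => decide (value ∈ g)) rest with
        | none => simp [solnScan, hk, appendAt]
        | some b => simp [solnScan, hk, appendAt]
    · by_cases hv : value ∈ g
      · simp only [fIdx, List.findIdx?_cons]
        cases List.findIdx? (fun g => decide (key ∈ g)) rest with
        | none => simp [solnScan, hk, hv, appendAt]
        | some a => simp [solnScan, hk, hv, appendAt]
      · simp only [fIdx, List.findIdx?_cons, hk, hv, decide_false, Bool.false_eq_true,
          if_false, solnScan, ih]
        simp only [fIdx] at ih ⊢
        cases List.findIdx? (fun g => decide (key ∈ g)) rest with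
        | none =>
          cases List.findIdx? (fun g => decide (value ∈ g)) rest with
          | none => simp
          | some b => simp [appendAt]
        | some a =>
          cases List.findIdx? (fun g => decide (value ∈ g)) rest with
          | none => simp [appendAt]
          | some b =>
            simp only [Option.map_some]
            by_cases hab : a ≤ b
            · simp [hab, appendAt]
            · simp [hab, appendAt]

def GInv (out : List (List String)) (idx : PySem.Dict String Nat) : Prop :=
  ∀ x, idx.get? x = fIdx x out

theorem fIdx_append_group (x : String) (out : List (List String)) (g : List String) :
    fIdx x (out ++ [g]) =
      match fIdx x out with
      | some j => some j
      | none => if x ∈ g then some out.length else none := by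
  simp only [fIdx, List.findIdx?_append, List.findIdx?_cons, List.findIdx?_nil, Option.map]
  cases hfx : List.findIdx? (fun g => decide (x ∈ g)) out with
  | none => by_cases hx : x ∈ g <;> simp [hx, Option.or]
  | some j => simp [Option.or]

theorem fIdx_appendAt_ne (x v : String) (h : x ≠ v) (out : List (List String)) (m : Nat) :
    fIdx x (appendAt out m v) = fIdx x out := by
  induction out generalizing m with
  | nil => rfl
  | cons g rest ih =>
    cases m with
    | zero => simp [appendAt, fIdx, List.findIdx?_cons, h]
    | succ n =>
      have h2 := ih n
      simp only [fIdx] at h2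
      simp [appendAt, fIdx, List.findIdx?_cons, h2]

theorem fIdx_appendAt_self (v : String) (out : List (List String)) (m : Nat)
    (hm : m < out.length)
    (hmin : ∀ j, fIdx v out = some j → m ≤ j) :
    fIdx v (appendAt out m v) = some m := by
  induction out generalizing m with
  | nil => simp at hm
  | cons g rest ih =>
    cases m with
    | zero => simp [appendAt, fIdx, List.findIdx?_cons]
    | succ n =>
      have hg : v ∉ g := by
        intro hvg
        have h0 : fIdx v (g :: rest) = some 0 := by
          simp [fIdx, List.findIdx?_cons, hvg]
        exact absurd (hmin 0 h0) (by omega)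
      have hrec := ih n (by simpa using hm) (fun j hj => by
        have : fIdx v (g :: rest) = some (j + 1) := by
          simp [fIdx, List.findIdx?_cons, hg]; simpa [fIdx] using hj
        have := hmin (j + 1) this; omega)
      simp only [appendAt, fIdx, List.findIdx?_cons, hg, decide_false, Bool.false_eq_true,
        if_false]
      simp only [fIdx] at hrec
      simp [hrec]

theorem fIdx_lt_length (x : String) (out : List (List String)) (j : Nat)
    (h : fIdx x out = some j) : j < out.length := by
  have := List.findIdx?_eq_some_iff_findIdx_eq.mp h
  omega

theorem ginv_insert (out : List (List String)) (idx : PySem.Dict String Nat)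
    (hInv : GInv out idx) (v : String) (m : Nat) (hm : m < out.length)
    (hmin : ∀ j, fIdx v out = some j → m ≤ j) :
    GInv (appendAt out m v) (idx.insert v m) := by
  intro x
  by_cases hx : x = v
  · subst hx
    rw [PySem.Dict.get?_insert_self, fIdx_appendAt_self x out m hm hmin]
  · rw [PySem.Dict.get?_insert_of_ne idx m hx, fIdx_appendAt_ne x v hx out m, hInv x]

theorem ginv_append (out : List (List String)) (idx : PySem.Dict String Nat)
    (hInv : GInv out idx) (key value : String)
    (hfk : fIdx key out = none) (hfv : fIdx value out = none) :
    GInv (out ++ [[key, value]])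
      ((idx.insert key out.length).insert value out.length) := by
  intro x
  rw [fIdx_append_group]
  by_cases hxv : x = value
  · subst hxv
    rw [PySem.Dict.get?_insert_self, hfv]
    simp
  · rw [PySem.Dict.get?_insert_of_ne _ _ hxv]
    by_cases hxk : x = key
    · subst hxk
      rw [PySem.Dict.get?_insert_self, hfk]
      simp
    · rw [PySem.Dict.get?_insert_of_ne _ _ hxk, hInv x]
      cases hfx : fIdx x out with
      | none => simp [hxk, hxv]
      | some j => simp

theorem step_eq (out : List (List String)) (idx : PySem.Dict String Nat)
    (hInv : GInv out idx) (d : List (String × String)) :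
    solnStep out d = (solnAltStep (out, idx) d).1 ∧
      GInv (solnStep out d) (solnAltStep (out, idx) d).2 := by
  have hkv := kv_eq d
  have hI : ∀ x, idx.get? x = fIdx x out := hInv
  unfold solnStep solnAltStep
  rw [scan_eq]
  cases hfk : fIdx (solnKey d) out with
  | none =>
    cases hfv : fIdx (solnVal d) out with
    | none =>
      simp only [hkv, hI, hfk, hfv]
      exact ⟨trivial, ginv_append out idx hInv _ _ hfk hfv⟩
    | some jv =>
      simp only [hkv, hI, hfk, hfv]
      refine ⟨trivial, ginv_insert out idx hInv _ jv (fIdx_lt_length _ _ _ hfv) ?_⟩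
      intro j hj; rw [hfk] at hj; cases hj
  | some jk =>
    cases hfv : fIdx (solnVal d) out with
    | none =>
      simp only [hkv, hI, hfk, hfv]
      refine ⟨trivial, ginv_insert out idx hInv _ jk (fIdx_lt_length _ _ _ hfk) ?_⟩
      intro j hj; rw [hfv] at hj; cases hj
    | some jv =>
      by_cases hle : jk ≤ jv
      · simp only [hkv, hI, hfk, hfv, hle, if_true]
        refine ⟨trivial, ginv_insert out idx hInv _ jk (fIdx_lt_length _ _ _ hfk) ?_⟩
        intro j hj; rw [hfv] at hj; cases hj; exact hle
      · simp only [hkv, hI, hfk, hfv, hle, if_false]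
        refine ⟨trivial, ginv_insert out idx hInv _ jv (fIdx_lt_length _ _ _ hfv) ?_⟩
        intro j hj; rw [hfk] at hj; cases hj; omega

theorem foldl_eq (l : List (List (String × String))) (out : List (List String))
    (idx : PySem.Dict String Nat) (hInv : GInv out idx) :
    l.foldl solnStep out = (l.foldl solnAltStep (out, idx)).1 := by
  induction l generalizing out idx with
  | nil => rfl
  | cons d rest ih =>
    obtain ⟨h1, h2⟩ := step_eq out idx hInv d
    simp only [List.foldl_cons, h1]
    have h3 := ih (solnAltStep (out, idx) d).1 (solnAltStep (out, idx) d).2 (h1 ▸ h2)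
    simpa using h3

theorem Inv_nil : GInv [] PySem.Dict.empty := by
  intro x; rfl

-- ===== VERDICT (by name: the statement is the Claim_ definition above) =====
theorem solution_spec : Claim_equal_solution := by
  intro input _ hPre
  unfold Spec_solution
  match input with
  | [] => exact absurd rfl hPre.1
  | d0 :: rest =>
    have h0 := step_eq [] PySem.Dict.empty Inv_nil d0
    show rest.foldl solnStep [[solnKey d0, solnVal d0]] = _
    have hstep : solnStep [] d0 = [[solnKey d0, solnVal d0]] := by
      simp [solnStep, solnScan]
    rw [← hstep, h0.1]
    have h4 := foldl_eq rest (solnAltStep ([], PySem.Dict.empty) d0).1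
      (solnAltStep ([], PySem.Dict.empty) d0).2 (h0.1 ▸ h0.2)
    simpa [solution_alt] using h4
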